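-- pv_equiv track=rewrite | github.com/HUIXIN-TW/BasicPython | analysiswithlist.py | mx1
-- ===== SOURCE A (Python) =====
-- def mx1(date_case):
--     max_list = []
--     # calculate max by month
--     for i in range(1 ,13):
--         month_max = 0
--         for data in date_case:
--             if data[1] == i:
--                 month_max = max(data[3], month_max)
--         max_list.append(month_max)
--     return max_list
-- ===== SOURCE B (Python) =====
-- def mx1(date_case):
--     max_list = [0] * 12
--     for data in date_case:
--         m = data[1]
--         if 1 <= m <= 12:
--             k = m - 1
--             if data[3] > max_list[k]:
--                 max_list[k] = data[3]
--     return max_list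
-- ===== Notes on version B (the rewrite author's own statement) =====
-- stated objective: alternative
-- what changed: Replaces the 12 repeated full scans (one per month) with a single pass that buckets each record's value into a preallocated 12-slot max list, ignoring months outside 1..12.
import Mathlib
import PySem

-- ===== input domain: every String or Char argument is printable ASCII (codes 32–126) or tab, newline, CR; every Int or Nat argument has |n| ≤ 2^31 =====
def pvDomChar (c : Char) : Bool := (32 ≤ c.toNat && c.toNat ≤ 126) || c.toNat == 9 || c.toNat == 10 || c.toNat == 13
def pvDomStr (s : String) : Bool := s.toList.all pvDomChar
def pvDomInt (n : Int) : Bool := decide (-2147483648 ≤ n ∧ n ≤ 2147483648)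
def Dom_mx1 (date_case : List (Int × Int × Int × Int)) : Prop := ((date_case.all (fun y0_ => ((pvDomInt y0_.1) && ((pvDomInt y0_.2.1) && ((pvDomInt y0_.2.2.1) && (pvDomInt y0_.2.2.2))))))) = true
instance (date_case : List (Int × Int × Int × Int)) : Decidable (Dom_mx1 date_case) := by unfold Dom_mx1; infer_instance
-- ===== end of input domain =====

-- B replaces A's 12 repeated full scans (one per month) by one pass bucketing each
-- record's value into a preallocated 12-slot max list (objective: alternative; single pass instead of 12 scans).

-- ===== PORT A =====
-- A: for i in range(1,13): month_max = 0; for data in date_case: if data[1]==i: month_max=max(data[3],month_max); append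
def mx1 (date_case : List (Int × Int × Int × Int)) : List Int :=
  (PySem.List.pyRange 1 13 1).foldl
    (fun max_list i =>
      max_list ++ [date_case.foldl
        (fun month_max data =>
          if data.2.1 == i then max data.2.2.2 month_max else month_max) 0])
    []

-- ===== PORT B =====
-- B: max_list = [0]*12; one pass; if 1 <= m <= 12 and data[3] > max_list[m-1]: max_list[m-1] = data[3]
-- (the guard 1 ≤ m ≤ 12 makes the index m-1 in range, so getD/set are exact for Python's indexing)
def mx1_alt (date_case : List (Int × Int × Int × Int)) : List Int :=
  date_case.foldl
    (fun max_list data =>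
      if 1 ≤ data.2.1 ∧ data.2.1 ≤ 12 then
        let k := (data.2.1 - 1).toNat
        if data.2.2.2 > max_list.getD k 0 then max_list.set k data.2.2.2 else max_list
      else max_list)
    (List.replicate 12 0)

-- ===== PRECONDITION & SPEC =====
def Spec_mx1 (date_case : List (Int × Int × Int × Int)) (out : List Int) : Prop := out = mx1_alt date_case
instance (date_case : List (Int × Int × Int × Int)) (out : List Int) : Decidable (Spec_mx1 date_case out) := by unfold Spec_mx1; infer_instance

-- ===== CLAIM (what is proved, stated in full; the proofs are below) =====
def Claim_equal_mx1 : Prop := ∀ (date_case : List (Int × Int × Int × Int)), Dom_mx1 date_case → Spec_mx1 date_case (mx1 date_case)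

-- ===== LEMMAS AND PROOFS =====

def pvCol (i : Int) (month_max : Int) (data : Int × Int × Int × Int) : Int :=
  if data.2.1 == i then max data.2.2.2 month_max else month_max

def pvStepB (max_list : List Int) (data : Int × Int × Int × Int) : List Int :=
  if 1 ≤ data.2.1 ∧ data.2.1 ≤ 12 then
    let k := (data.2.1 - 1).toNat
    if data.2.2.2 > max_list.getD k 0 then max_list.set k data.2.2.2 else max_list
  else max_list

theorem pvStepB_length (acc : List Int) (d : Int × Int × Int × Int) :
    (pvStepB acc d).length = acc.length := by
  unfold pvStepB
  by_cases h1 : 1 ≤ d.2.1 ∧ d.2.1 ≤ 12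
  · rw [if_pos h1]; dsimp only; split_ifs <;> simp
  · rw [if_neg h1]

theorem pvFoldB_length (l : List (Int × Int × Int × Int)) (acc : List Int) :
    (l.foldl pvStepB acc).length = acc.length := by
  induction l generalizing acc with
  | nil => rfl
  | cons d l ih => simp [List.foldl, ih, pvStepB_length]

theorem pvStepB_getD (acc : List Int) (d : Int × Int × Int × Int) (j : ℕ)
    (hlen : acc.length = 12) (hj : j < 12) :
    (pvStepB acc d).getD j 0 = pvCol ((j : Int) + 1) (acc.getD j 0) d := by
  unfold pvStepB pvCol
  by_cases hm : 1 ≤ d.2.1 ∧ d.2.1 ≤ 12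
  · rw [if_pos hm]
    by_cases hk : (d.2.1 - 1).toNat = j
    · have hmi : (d.2.1 == (j : Int) + 1) = true := by
        simp only [beq_iff_eq]; omega
      rw [hmi, if_pos rfl]
      by_cases hv : d.2.2.2 > acc.getD ((d.2.1 - 1).toNat) 0
      · rw [if_pos hv]
        rw [hk] at hv ⊢
        have hjl : j < acc.length := by omega
        rw [List.getD_eq_getElem _ _ hjl] at hv
        simp [List.getD, hjl, max_eq_left (le_of_lt hv)]
      · rw [if_neg hv]
        rw [hk] at hv
        exact (max_eq_right (le_of_not_gt hv)).symm
    · have hne : (d.2.1 == (j : Int) + 1) = false := by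
        simp only [beq_eq_false_iff_ne, ne_eq]; intro h; omega
      rw [hne]
      have hnoc : ¬ (false = true) := by simp
      rw [if_neg hnoc]
      by_cases hv : d.2.2.2 > acc.getD ((d.2.1 - 1).toNat) 0
      · rw [if_pos hv]
        have hkk : ¬ (d.2.1.toNat - 1 = j) := by omega
        simp [List.getD, hkk]
      · rw [if_neg hv]
  · rw [if_neg hm]
    have hne : (d.2.1 == (j : Int) + 1) = false := by
      simp only [beq_eq_false_iff_ne, ne_eq]; intro h; omega
    rw [hne]
    simp

theorem pvFoldB_getD (l : List (Int × Int × Int × Int)) (acc : List Int) (j : ℕ)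
    (hlen : acc.length = 12) (hj : j < 12) :
    (l.foldl pvStepB acc).getD j 0 = l.foldl (pvCol ((j : Int) + 1)) (acc.getD j 0) := by
  induction l generalizing acc with
  | nil => rfl
  | cons d l ih =>
      simp only [List.foldl]
      rw [ih _ ((pvStepB_length acc d).trans hlen), pvStepB_getD acc d j hlen hj]

theorem pvRange_1_13 : PySem.List.pyRange 1 13 1 = [1,2,3,4,5,6,7,8,9,10,11,12] := by decide

theorem mx1_eq_map (date_case : List (Int × Int × Int × Int)) :
    mx1 date_case =
      ([1,2,3,4,5,6,7,8,9,10,11,12] : List Int).map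
        (fun i => date_case.foldl (pvCol i) 0) := by
  unfold mx1
  rw [pvRange_1_13, PySem.List.foldl_append_singleton_eq_map]
  rfl

theorem mx1_spec : Claim_equal_mx1 := by
  intro date_case _
  unfold Spec_mx1
  have halt : mx1_alt date_case = date_case.foldl pvStepB (List.replicate 12 0) := rfl
  rw [mx1_eq_map, halt]
  have hlen : (date_case.foldl pvStepB (List.replicate 12 0)).length = 12 := by
    rw [pvFoldB_length]; simp
  apply List.ext_getElem
  · rw [hlen]; simp
  · intro j h1 h2
    have hj : j < 12 := by simpa using h1
    have h0 : (List.replicate 12 (0:Int)).getD j 0 = 0 := by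
      interval_cases j <;> rfl
    have hgetD := pvFoldB_getD date_case (List.replicate 12 0) j (by simp) hj
    rw [h0] at hgetD
    have hB := (List.getD_eq_getElem (date_case.foldl pvStepB (List.replicate 12 0)) 0 h2).symm
    rw [hB, hgetD]
    interval_cases j <;> norm_num
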